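-- pv_equiv track=rewrite | github.com/ViZhiratkova/PerfomansLab-Test | task1/task1.py | arr_all
-- ===== SOURCE A (Python) =====
-- def arr_all(n, m):
--     if n <= 0 or m <= 0:
--         return []
--     head = []
--     current = 0
--     while True:
--         head.append(current + 1)
--         current = (current + m - 1) % n
--         if current == 0:
--             break
--     return head
-- ===== SOURCE B (Python) =====
-- def arr_all(n, m):
--     if n <= 0 or m <= 0:
--         return []
--     a, b = n, m - 1
--     while b:
--         a, b = b, a % b
--     length = n // a
--     return [k * (m - 1) % n + 1 for k in range(length)]
-- ===== Notes on version B (the rewrite author's own statement) =====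
-- stated objective: alternative
-- what changed: B computes the orbit length n // gcd(n, m-1) up front with Euclid's algorithm and builds the list as a direct comprehension [k*(m-1) % n + 1 for k in range(length)], instead of A's while-loop that threads a running 'current' and stops when it returns to 0.
import Mathlib
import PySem

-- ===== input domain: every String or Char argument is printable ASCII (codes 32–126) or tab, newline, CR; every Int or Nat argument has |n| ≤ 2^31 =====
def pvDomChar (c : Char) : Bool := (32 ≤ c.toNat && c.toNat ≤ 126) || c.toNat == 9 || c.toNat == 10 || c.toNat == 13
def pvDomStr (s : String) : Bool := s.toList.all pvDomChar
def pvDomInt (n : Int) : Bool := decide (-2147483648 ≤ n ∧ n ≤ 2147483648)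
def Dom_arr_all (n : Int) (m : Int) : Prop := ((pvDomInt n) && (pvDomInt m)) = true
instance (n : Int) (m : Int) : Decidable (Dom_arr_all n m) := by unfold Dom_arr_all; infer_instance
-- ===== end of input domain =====

-- B replaces A's step-until-return-to-start while-loop by a gcd-derived orbit length and a
-- direct comprehension (objective: alternative algorithm of the same cost).

-- ===== PORT A =====
-- A's `while True` loop; it runs exactly n / gcd(n, m-1) ≤ n iterations (proved below),
-- so fuel n.toNat is always sufficient and the port is exact on every input.
def arrLoopA (n : Int) (m : Int) : Nat → Int → List Int
  | 0, _ => []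
  | fuel + 1, current =>
      (current + 1) ::
        (let c := PySem.Int.mod (current + m - 1) n
         if c = 0 then [] else arrLoopA n m fuel c)

def arr_all (n : Int) (m : Int) : List Int :=
  if n ≤ 0 ∨ m ≤ 0 then [] else arrLoopA n m n.toNat 0

-- ===== PORT B =====
-- Source B's hand-written Euclid loop `while b: a, b = b, a % b`
def pyGcd (a : Int) (b : Int) : Int :=
  if hb0 : b = 0 then a else pyGcd b (PySem.Int.mod a b)
termination_by b.natAbs
decreasing_by
  rcases lt_or_gt_of_ne hb0 with hb | hb
  · have h1 := PySem.Int.mod_neg_bounds a hb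
    omega
  · have h1 := PySem.Int.mod_nonneg a hb
    have h2 := PySem.Int.mod_lt a hb
    omega

def arr_all_alt (n : Int) (m : Int) : List Int :=
  if n ≤ 0 ∨ m ≤ 0 then []
  else
    let g := pyGcd n (m - 1)
    let length := PySem.Int.floordiv n g
    (PySem.List.pyRange 0 length 1).map (fun k => PySem.Int.mod (k * (m - 1)) n + 1)

-- ===== PRECONDITION & SPEC =====
def Spec_arr_all (n : Int) (m : Int) (out : List Int) : Prop := out = arr_all_alt n m
instance (n : Int) (m : Int) (out : List Int) : Decidable (Spec_arr_all n m out) := by unfold Spec_arr_all; infer_instance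

-- ===== CLAIM (what is proved, stated in full; the proofs are below) =====
def Claim_equal_arr_all : Prop := ∀ (n : Int) (m : Int), Dom_arr_all n m → Spec_arr_all n m (arr_all n m)

-- ===== LEMMAS AND PROOFS =====

-- Euclid on nonnegative ints computes Nat.gcd
theorem pyGcd_natCast (b a : Nat) : pyGcd (a : Int) (b : Int) = (Nat.gcd a b : Int) := by
  induction b using Nat.strong_induction_on generalizing a with
  | _ b ih =>
    rcases Nat.eq_zero_or_pos b with hb | hb
    · subst hb; rw [pyGcd]; simp
    · have hbz : (b : Int) ≠ 0 := by exact_mod_cast hb.ne'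
      rw [pyGcd]
      simp only [dif_neg hbz]
      rw [PySem.Int.mod_natCast, ih (a % b) (Nat.mod_lt a hb)]
      rw [Nat.gcd_comm b (a % b), ← Nat.gcd_rec b a, Nat.gcd_comm]

-- divisibility characterisation: N | j*d iff (N / gcd N d) | j  (for N > 0)
theorem coprime_factor_dvd (g N' d' j : Nat) (hg : 0 < g) (hco : N'.Coprime d') :
    g * N' ∣ j * (g * d') ↔ N' ∣ j := by
  rw [show j * (g * d') = g * (j * d') by ring, Nat.mul_dvd_mul_iff_left hg]
  constructor
  · exact fun h => hco.dvd_of_dvd_mul_right h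
  · exact fun h => h.mul_right d'

theorem dvd_mul_iff_div_gcd_dvd (N d j : Nat) (hN : 0 < N) :
    N ∣ j * d ↔ (N / Nat.gcd N d) ∣ j := by
  have hg : 0 < Nat.gcd N d := Nat.gcd_pos_of_pos_left d hN
  have hco : (N / Nat.gcd N d).Coprime (d / Nat.gcd N d) := Nat.coprime_div_gcd_div_gcd hg
  have e1 : Nat.gcd N d * (N / Nat.gcd N d) = N := Nat.mul_div_cancel' (Nat.gcd_dvd_left N d)
  have e2 : Nat.gcd N d * (d / Nat.gcd N d) = d := Nat.mul_div_cancel' (Nat.gcd_dvd_right N d)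
  have key := coprime_factor_dvd (Nat.gcd N d) (N / Nat.gcd N d) (d / Nat.gcd N d) j hg hco
  rw [e1, e2] at key
  exact key

-- the loop, started at step k with the right current value and enough fuel, yields the rest of the orbit
theorem arrLoopA_eq (n m : Int) (N d : Nat) (hN : 0 < N) (hn : (N : Int) = n) (hd : (d : Int) = m - 1) :
    ∀ (t k fuel : Nat), k + t = N / Nat.gcd N d → 0 < t → t ≤ fuel →
      arrLoopA n m fuel ((k * d % N : Nat) : Int) =
        (List.range' k t).map (fun j => ((j * d % N : Nat) : Int) + 1) := by
  intro t
  induction t with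
  | zero => intro k fuel _ h0; omega
  | succ t ih =>
    intro k fuel hkt _ hfuel
    obtain ⟨f, rfl⟩ : ∃ f, fuel = f + 1 := ⟨fuel - 1, by omega⟩
    rw [arrLoopA]
    have hstep : PySem.Int.mod (((k * d % N : Nat) : Int) + m - 1) n
        = (((k + 1) * d % N : Nat) : Int) := by
      have h1 : ((k * d % N : Nat) : Int) + m - 1 = ((k * d % N + d : Nat) : Int) := by
        push_cast; omega
      rw [h1, ← hn, PySem.Int.mod_natCast]
      congr 1
      rw [Nat.mod_add_mod]
      congr 1
      ring
    have hzero : (((k + 1) * d % N : Nat) : Int) = 0 ↔ (N / Nat.gcd N d) ∣ (k + 1) := by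
      rw [show ((0:Int) = ((0:Nat):Int)) from rfl, Int.natCast_inj]
      rw [← Nat.dvd_iff_mod_eq_zero]
      exact dvd_mul_iff_div_gcd_dvd N d (k+1) hN
    rcases Nat.eq_zero_or_pos t with ht | ht
    · -- last iteration: k + 1 = L, the loop exits
      subst ht
      have hL : k + 1 = N / Nat.gcd N d := by omega
      have hz : (((k + 1) * d % N : Nat) : Int) = 0 := hzero.mpr (hL ▸ dvd_refl _)
      simp only [hstep, hz]
      simp [List.range']
    · -- middle iteration: 0 < k+1 < L, current ≠ 0, recurse
      have hlt : k + 1 < N / Nat.gcd N d := by omega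
      have hne : (((k + 1) * d % N : Nat) : Int) ≠ 0 := by
        intro h
        have hdvd := hzero.mp h
        have := Nat.le_of_dvd (by omega) hdvd
        omega
      simp only [hstep, if_neg hne]
      rw [ih (k + 1) f (by omega) ht (by omega)]
      rw [List.range'_succ]
      simp

theorem arr_all_spec_aux (n m : Int) (hn : 0 < n) (hm : 0 < m) :
    arr_all n m = arr_all_alt n m := by
  set N := n.toNat with hNdef
  set d := (m - 1).toNat with hddef
  have hN : 0 < N := by omega
  have hnc : (N : Int) = n := by omega
  have hdc : (d : Int) = m - 1 := by omega
  have hg : pyGcd n (m - 1) = (Nat.gcd N d : Int) := by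
    rw [← hnc, ← hdc]; exact pyGcd_natCast d N
  have hgpos : 0 < Nat.gcd N d := Nat.gcd_pos_of_pos_left d hN
  set L := N / Nat.gcd N d with hLdef
  have hLpos : 0 < L := Nat.div_pos (Nat.le_of_dvd hN (Nat.gcd_dvd_left N d)) hgpos
  have hLN : L ≤ N := Nat.div_le_self N _
  -- A side: the loop walks the orbit
  have hA : arr_all n m = (List.range' 0 L).map (fun j => ((j * d % N : Nat) : Int) + 1) := by
    rw [arr_all, if_neg (by omega)]
    have h0 : ((0 * d % N : Nat) : Int) = 0 := by simp
    rw [← h0]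
    exact arrLoopA_eq n m N d hN hnc hdc L 0 n.toNat (by omega) hLpos (by omega)
  -- B side: the comprehension over range L, then pointwise agreement
  rw [hA, arr_all_alt, if_neg (by omega)]
  simp only [hg]
  rw [← hnc, PySem.Int.floordiv_natCast, ← hLdef, PySem.List.pyRange_one]
  simp only [Int.sub_zero, Int.toNat_natCast, List.map_map]
  rw [List.range_eq_range']
  apply List.map_congr_left
  intro j _
  simp only [Function.comp_apply]
  rw [← hdc]
  rw [show ((0:Int) + (j:Int)) * (d:Int) = ((j * d : Nat) : Int) by push_cast; ring]
  rw [PySem.Int.mod_natCast]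

-- ===== VERDICT (by name: the statement is the Claim_ definition above) =====
theorem arr_all_spec : Claim_equal_arr_all := by
  intro n m _
  unfold Spec_arr_all
  by_cases h : n ≤ 0 ∨ m ≤ 0
  · rw [arr_all, arr_all_alt, if_pos h, if_pos h]
  · push Not at h
    exact arr_all_spec_aux n m h.1 h.2
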